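-- pv_equiv track=rewrite | github.com/frank-cywong/AdventOfCode | 2023/twelve.py | go_test
-- ===== SOURCE A (Python) =====
-- def go_test(s, a):
--     ccv = 0
--     iv = 0
--     for c in s:
--         if(c == "."):
--             if(ccv != 0):
--                 if(a[iv] != ccv):
--                     return False
--                 iv += 1
--                 ccv = 0
--         elif(c == "#"):
--             if(iv >= len(a)):
--                 return False
--             ccv += 1
--     if(ccv != 0):
--         if(a[iv] != ccv):
--             return False
--         iv += 1
--         ccv = 0
--     if(iv != len(a)):
--         return False
--     return True
-- ===== SOURCE B (Python) =====
-- def go_test(s, a):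
--     parts = s.split('.')
--     groups = [p.count('#') for p in parts if p.count('#') > 0]
--     return groups == list(a)
-- ===== Notes on version B (the rewrite author's own statement) =====
-- stated objective: simpler
-- what changed: B replaces A's single-pass state machine (running '#' count, index into a, early returns) with a direct decomposition: split the string on '.', count '#' in each piece, drop empty groups, and compare the group list to list(a).
import Mathlib
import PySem

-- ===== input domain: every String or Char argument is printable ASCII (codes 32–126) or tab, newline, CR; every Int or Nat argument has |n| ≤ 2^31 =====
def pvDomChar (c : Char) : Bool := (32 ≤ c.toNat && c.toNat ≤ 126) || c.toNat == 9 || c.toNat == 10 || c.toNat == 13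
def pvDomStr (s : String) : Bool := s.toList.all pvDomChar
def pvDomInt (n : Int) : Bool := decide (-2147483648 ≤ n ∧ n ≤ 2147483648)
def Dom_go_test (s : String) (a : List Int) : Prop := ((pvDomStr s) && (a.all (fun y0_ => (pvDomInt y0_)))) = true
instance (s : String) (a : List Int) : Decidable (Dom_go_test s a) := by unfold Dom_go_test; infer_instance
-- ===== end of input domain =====

-- B replaces A's running state machine with split-on-'.'/count-'#'/compare — a simpler decomposition, same cost.


-- ===== PORT A =====
-- The loop of A, transliterated: state is (ccv, iv); early `return False` becomes
-- returning `false`. The index a[iv] is accessed only under A's own guards, which keep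
-- iv in range whenever ccv ≠ 0 (proved below); the `none` branch is unreachable.
def goA (a : List Int) : List Char → Int → Nat → Bool
  | [], ccv, iv =>
      -- trailing `if ccv != 0` block, then `iv != len(a)` check
      if ccv ≠ 0 then
        match a[iv]? with
        | some v => if v ≠ ccv then false else decide (iv + 1 = a.length)
        | none => false
      else decide (iv = a.length)
  | c :: rest, ccv, iv =>
      if c = '.' then
        if ccv ≠ 0 then
          match a[iv]? with
          | some v => if v ≠ ccv then false else goA a rest 0 (iv + 1)
          | none => false
        else goA a rest ccv iv
      else if c = '#' then
        if a.length ≤ iv then false else goA a rest (ccv + 1) iv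
      else goA a rest ccv iv

def go_test (s : String) (a : List Int) : Bool := goA a s.toList 0 0

-- ===== PORT B =====
-- Hand port of Python's s.split('.') — exact for a single-character separator.
def splitDot : List Char → List (List Char)
  | [] => [[]]
  | c :: r =>
      if c = '.' then [] :: splitDot r
      else
        match splitDot r with
        | p :: ps => (c :: p) :: ps
        | [] => [[c]]

-- p.count('#') is List.count — exact for a single-character needle.
def go_test_alt (s : String) (a : List Int) : Bool :=
  let parts := splitDot s.toList
  let groups := parts.filterMap (fun p =>
    let c : Int := (p.count '#' : Nat)
    if c > 0 then some c else none)
  groups == a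

-- ===== PRECONDITION & SPEC =====
def Spec_go_test (s : String) (a : List Int) (out : Bool) : Prop := out = go_test_alt s a
instance (s : String) (a : List Int) (out : Bool) : Decidable (Spec_go_test s a out) := by unfold Spec_go_test; infer_instance

-- ===== CLAIM (what is proved, stated in full; the proofs are below) =====
def Claim_equal_go_test : Prop := ∀ (s : String) (a : List Int), Dom_go_test s a → Spec_go_test s a (go_test s a)

-- ===== LEMMAS AND PROOFS =====

-- The '#'-group lengths of l, given a pending run of length ccv carried in from the left.
def groupsC : List Char → Int → List Int
  | [], ccv => if ccv ≠ 0 then [ccv] else []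
  | c :: r, ccv =>
      if c = '.' then (if ccv ≠ 0 then ccv :: groupsC r 0 else groupsC r 0)
      else if c = '#' then groupsC r (ccv + 1)
      else groupsC r ccv

def groupsF (parts : List (List Char)) : List Int :=
  parts.filterMap (fun p =>
    let c : Int := (p.count '#' : Nat)
    if c > 0 then some c else none)

theorem groupsC_ne_nil : ∀ (l : List Char) (ccv : Int), 0 < ccv → groupsC l ccv ≠ [] := by
  intro l
  induction l with
  | nil =>
      intro ccv h
      simp only [groupsC]
      rw [if_pos (show ccv ≠ 0 by omega)]
      simp
  | cons c r ih =>
      intro ccv h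
      by_cases hc : c = '.'
      · simp only [groupsC, if_pos hc]
        rw [if_pos (show ccv ≠ 0 by omega)]
        simp
      · by_cases hh : c = '#'
        · simpa [groupsC, hc, hh] using ih (ccv + 1) (by omega)
        · simpa [groupsC, hc, hh] using ih ccv h

theorem splitDot_ne_nil : ∀ (l : List Char), splitDot l ≠ [] := by
  intro l
  cases l with
  | nil => simp [splitDot]
  | cons c r =>
      by_cases hc : c = '.'
      · simp [splitDot, hc]
      · simp only [splitDot, hc, if_false]
        cases splitDot r <;> simp

theorem groupsF_cons (p : List Char) (ps : List (List Char)) :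
    groupsF (p :: ps) =
      if 0 < ((p.count '#' : Nat) : Int) then ((p.count '#' : Nat) : Int) :: groupsF ps
      else groupsF ps := by
  simp only [groupsF, List.filterMap_cons]
  by_cases h : 0 < ((p.count '#' : Nat) : Int)
  · rw [if_pos h, if_pos h]
  · rw [if_neg h, if_neg h]

theorem groupsC_eq_groupsF_split : ∀ (l : List Char) (ccv : Int) (p : List Char) (ps : List (List Char)),
    0 ≤ ccv → splitDot l = p :: ps →
    groupsC l ccv =
      (if 0 < ccv + ((p.count '#' : Nat) : Int) then (ccv + ((p.count '#' : Nat) : Int)) :: groupsF ps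
       else groupsF ps) := by
  intro l
  induction l with
  | nil =>
      intro ccv p ps h hp
      simp only [splitDot, List.cons.injEq] at hp
      obtain ⟨hp1, hp2⟩ := hp
      subst hp1; subst hp2
      simp only [groupsC, List.count_nil, Nat.cast_zero, add_zero]
      by_cases h0 : ccv = 0
      · rw [if_neg (by simp [h0]), if_neg (by omega)]
        simp [groupsF]
      · rw [if_pos h0, if_pos (by omega)]
        simp [groupsF]
  | cons c r ih =>
      intro ccv p ps h hp
      rcases hq : splitDot r with _ | ⟨q, qs⟩
      · exact absurd hq (splitDot_ne_nil r)
      have hGF : groupsF (splitDot r) = groupsC r 0 := by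
        rw [ih 0 q qs le_rfl hq, hq, groupsF_cons]
        simp
      by_cases hc : c = '.'
      · subst hc
        simp [splitDot] at hp
        obtain ⟨hp1, hp2⟩ := hp
        subst hp1; subst hp2
        have hstep : groupsC ('.' :: r) ccv
            = if ccv ≠ 0 then ccv :: groupsC r 0 else groupsC r 0 := by
          simp [groupsC]
        rw [hstep]
        simp only [List.count_nil, Nat.cast_zero, add_zero]
        by_cases h0 : ccv = 0
        · rw [if_neg (by simp [h0]), if_neg (by omega), hGF]
        · rw [if_pos h0, if_pos (by omega), hGF]
      · simp only [splitDot, if_neg hc, hq, List.cons.injEq] at hp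
        obtain ⟨hp1, hp2⟩ := hp
        subst hp1; subst hp2
        by_cases hh : c = '#'
        · subst hh
          have hstep : groupsC ('#' :: r) ccv = groupsC r (ccv + 1) := by simp [groupsC]
          rw [hstep, ih (ccv + 1) q qs (by omega) hq]
          have h1 : ccv + 1 + ((q.count '#' : Nat) : Int)
              = ccv + (((('#' : Char) :: q).count '#' : Nat) : Int) := by
            simp only [List.count_cons, beq_self_eq_true, if_true]
            push_cast; ring
          rw [h1]
        · have hstep : groupsC (c :: r) ccv = groupsC r ccv := by simp [groupsC, hc, hh]
          rw [hstep, ih ccv q qs h hq]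
          have h1 : ((c :: q).count '#' : Nat) = (q.count '#' : Nat) := by
            simp [hh]
          rw [h1]

theorem goA_eq_groupsC : ∀ (l : List Char) (a : List Int) (ccv : Int) (iv : Nat),
    0 ≤ ccv → iv ≤ a.length → (ccv ≠ 0 → iv < a.length) →
    goA a l ccv iv = decide (groupsC l ccv = a.drop iv) := by
  intro l
  induction l with
  | nil =>
      intro a ccv iv hc hle hlt
      by_cases h0 : ccv = 0
      · subst h0
        have hA : goA a [] 0 iv = decide (iv = a.length) := by simp [goA]
        have hG : groupsC [] (0 : Int) = [] := by simp [groupsC]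
        rw [hA, hG]
        simp only [decide_eq_decide]
        constructor
        · intro h; subst h; simp
        · intro h; have := List.drop_eq_nil_iff.mp h.symm; omega
      · have hivlt := hlt h0
        have hsome : a[iv]? = some a[iv] := List.getElem?_eq_getElem hivlt
        have hA : goA a [] ccv iv
            = (if a[iv] ≠ ccv then false else decide (iv + 1 = a.length)) := by
          simp only [goA, if_pos h0, hsome]
        have hdrop : a.drop iv = a[iv] :: a.drop (iv + 1) := List.drop_eq_getElem_cons hivlt
        have hG : groupsC [] ccv = [ccv] := by simp [groupsC, h0]
        rw [hA, hG, hdrop]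
        by_cases heq : a[iv] = ccv
        · rw [if_neg (by simp [heq])]
          simp only [decide_eq_decide]
          constructor
          · intro h
            have hnil : a.drop (iv + 1) = [] := List.drop_eq_nil_of_le (by omega)
            rw [heq, hnil]
          · intro h
            injection h with h1 h2
            have := List.drop_eq_nil_iff.mp h2.symm
            omega
        · rw [if_pos heq]
          have hne : ¬ ([ccv] = a[iv] :: a.drop (iv + 1)) := by
            intro h; injection h with h1 _; exact heq h1.symm
          exact (decide_eq_false hne).symm
  | cons c rest ih =>
      intro a ccv iv hc hle hlt
      by_cases hdot : c = '.'
      · subst hdot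
        have hGstep : groupsC ('.' :: rest) ccv
            = if ccv ≠ 0 then ccv :: groupsC rest 0 else groupsC rest 0 := by
          simp [groupsC]
        by_cases h0 : ccv = 0
        · subst h0
          have hA : goA a ('.' :: rest) 0 iv = goA a rest 0 iv := by simp [goA]
          rw [hA, ih a 0 iv le_rfl hle (by simp), hGstep]
          simp
        · have hivlt := hlt h0
          have hsome : a[iv]? = some a[iv] := List.getElem?_eq_getElem hivlt
          have hA : goA a ('.' :: rest) ccv iv
              = (if a[iv] ≠ ccv then false else goA a rest 0 (iv + 1)) := by
            simp only [goA, if_pos h0, hsome]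
            rw [if_pos trivial]
          have hdrop : a.drop iv = a[iv] :: a.drop (iv + 1) := List.drop_eq_getElem_cons hivlt
          rw [hA, hGstep, if_pos h0, hdrop]
          by_cases heq : a[iv] = ccv
          · rw [if_neg (by simp [heq]), ih a 0 (iv + 1) le_rfl (by omega) (by simp)]
            simp only [decide_eq_decide, List.cons.injEq, heq]
            simp
          · rw [if_pos heq]
            have hne : ¬ (ccv :: groupsC rest 0 = a[iv] :: a.drop (iv + 1)) := by
              intro h
              injection h with h1 _
              exact heq h1.symm
            exact (decide_eq_false hne).symm
      · by_cases hh : c = '#'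
        · subst hh
          have hGstep : groupsC ('#' :: rest) ccv = groupsC rest (ccv + 1) := by
            simp [groupsC]
          by_cases hbig : a.length ≤ iv
          · have hA : goA a ('#' :: rest) ccv iv = false := by simp [goA, hbig]
            have hnil : a.drop iv = [] := List.drop_eq_nil_of_le hbig
            have hne : groupsC ('#' :: rest) ccv ≠ [] := by
              rw [hGstep]; exact groupsC_ne_nil rest (ccv + 1) (by omega)
            rw [hA, hnil]
            simp [hne]
          · have hA : goA a ('#' :: rest) ccv iv = goA a rest (ccv + 1) iv := by
              simp [goA, hbig]
            rw [hA, ih a (ccv + 1) iv (by omega) hle (by intro _; omega), hGstep]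
        · have hA : goA a (c :: rest) ccv iv = goA a rest ccv iv := by
            simp [goA, hdot, hh]
          have hGstep : groupsC (c :: rest) ccv = groupsC rest ccv := by
            simp [groupsC, hdot, hh]
          rw [hA, hGstep, ih a ccv iv hc hle hlt]

theorem go_test_eq_alt (s : String) (a : List Int) : go_test s a = go_test_alt s a := by
  unfold go_test go_test_alt
  rw [goA_eq_groupsC s.toList a 0 0 le_rfl (Nat.zero_le _) (by intro h; exact absurd rfl h)]
  rcases hp : splitDot s.toList with _ | ⟨p, ps⟩
  · exact absurd hp (splitDot_ne_nil s.toList)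
  · rw [groupsC_eq_groupsF_split s.toList 0 p ps le_rfl hp]
    show _ = (groupsF (p :: ps) == a)
    rw [Bool.beq_eq_decide_eq, groupsF_cons]
    simp only [List.drop_zero, zero_add]

-- ===== VERDICT (by name: the statement is the Claim_ definition above) =====
theorem go_test_spec : Claim_equal_go_test := by
  intro s a _
  unfold Spec_go_test
  exact go_test_eq_alt s a
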